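-- pv_equiv track=rewrite | github.com/Kratosgado/python-scripts | consecutive_prime_sum.py | getConsecutivePrimeSum
-- ===== SOURCE A (Python) =====
-- def checkPrime(number):
--     factors = 0
--     for i in range(2, number+1, 1):
--         if (number % i == 0):
--             factors += 1
--         if (factors > 1):
--             return 0
--     if (factors == 1):
--         return number
--     return 0
--
-- def getPrimes(prime):
--     primes = []
--     for i in range(2, prime, 1):
--         primes.append(checkPrime(i)) if (checkPrime(i) == i) else ""
--     return primes
--
-- def getConsecutivePrimeSum(prime):
--
--     primes = getPrimes(prime)
--     sum = 0
--     for i in range(len(primes)-1):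
--         sum += primes[i]
--         if (sum == prime):
--             return sum
--         if (sum > prime):
--             return
-- ===== SOURCE B (Python) =====
-- def getConsecutivePrimeSum(prime):
--     # Sieve of Eratosthenes-style composite marking replaces A's O(n^2) trial division,
--     # then the same consecutive-prime-sum accumulation over all primes below `prime`
--     # except the last one (matching A's range(len(primes)-1) loop).
--     n = prime if prime > 2 else 2
--     comp = [False] * n
--     for i in range(2, n):
--         for m in range(2, (n - 1) // i + 1):
--             comp[i * m] = True
--     primes = [i for i in range(2, prime) if not comp[i]]
--     s = 0
--     for q in primes[:-1]:
--         s += q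
--         if s == prime:
--             return s
--         if s > prime:
--             return None
--     return None
-- ===== Notes on version B (the rewrite author's own statement) =====
-- stated objective: faster
-- what changed: B replaces A's per-candidate trial division (checkPrime scans all of 2..i for every i, called twice per candidate) with a single sieve-style composite-marking pass over one boolean array, keeping the same consecutive-prime-sum accumulation over all primes below the input except the last.
import Mathlib
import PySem

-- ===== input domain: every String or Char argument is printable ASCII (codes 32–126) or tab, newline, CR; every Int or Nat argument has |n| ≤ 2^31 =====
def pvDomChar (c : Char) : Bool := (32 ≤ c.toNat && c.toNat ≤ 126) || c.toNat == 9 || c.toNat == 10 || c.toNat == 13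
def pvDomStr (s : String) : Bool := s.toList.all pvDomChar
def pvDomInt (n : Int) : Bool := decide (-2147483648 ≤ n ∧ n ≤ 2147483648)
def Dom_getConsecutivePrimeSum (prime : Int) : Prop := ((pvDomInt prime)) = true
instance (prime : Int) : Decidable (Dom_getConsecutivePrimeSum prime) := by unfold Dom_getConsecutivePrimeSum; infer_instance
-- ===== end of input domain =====

-- B replaces A's O(n^2) per-candidate trial division with a single sieve-style
-- composite-marking pass, keeping A's consecutive-sum loop over all primes below
-- `prime` except the last one.

-- ===== PORT A =====
-- checkPrime's loop: counts factors, early-returns 0 once a second factor is seen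
def checkLoop (n : Int) (factors : Int) : List Int → Int
  | [] => if factors == 1 then n else 0
  | i :: rest =>
    let f := if PySem.Int.mod n i == 0 then factors + 1 else factors
    if f > 1 then 0 else checkLoop n f rest

def checkPrime (n : Int) : Int := checkLoop n 0 (PySem.List.pyRange 2 (n + 1) 1)

def getPrimes (prime : Int) : List Int :=
  (PySem.List.pyRange 2 prime 1).foldl
    (fun acc i => if checkPrime i == i then acc ++ [checkPrime i] else acc) []

-- the 'for i in range(len(primes)-1)' summation loop of A
def sumLoopA (prime : Int) (primes : List Int) (s : Int) : List Int → Option Int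
  | [] => none
  | i :: rest =>
    let s' := s + PySem.List.pyGetD primes i 0   -- primes[i], i always in range here
    if s' == prime then some s'
    else if s' > prime then none
    else sumLoopA prime primes s' rest

def getConsecutivePrimeSum (prime : Int) : Option Int :=
  let primes := getPrimes prime
  sumLoopA prime primes 0 (PySem.List.pyRange 0 ((primes.length : Int) - 1) 1)

-- ===== PORT B =====
-- inner loop: for m in range(2, (n-1)//i + 1): comp[i*m] = True  (index always in range)
def markMultiples (i n : Int) (comp : List Bool) : List Bool :=
  (PySem.List.pyRange 2 (PySem.Int.floordiv (n - 1) i + 1) 1).foldl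
    (fun c m => c.set (i * m).toNat true) comp

-- comp = [False]*n, then the double marking loop
def sieve (n : Int) : List Bool :=
  (PySem.List.pyRange 2 n 1).foldl
    (fun c i => markMultiples i n c) (List.replicate n.toNat false)

-- the 'for q in primes[:-1]' summation loop of B
def sumLoopB (prime : Int) (s : Int) : List Int → Option Int
  | [] => none
  | q :: rest =>
    let s' := s + q
    if s' == prime then some s'
    else if s' > prime then none
    else sumLoopB prime s' rest

def getConsecutivePrimeSum_alt (prime : Int) : Option Int :=
  let n := if prime > 2 then prime else 2
  let comp := sieve n
  let primes := (PySem.List.pyRange 2 prime 1).foldl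
    (fun acc i => if !(PySem.List.pyGetD comp i false) then acc ++ [i] else acc) []
  sumLoopB prime 0 (PySem.List.slice primes none (some (-1)))

-- ===== PRECONDITION & SPEC =====
def Spec_getConsecutivePrimeSum (prime : Int) (out : Option Int) : Prop := out = getConsecutivePrimeSum_alt prime
instance (prime : Int) (out : Option Int) : Decidable (Spec_getConsecutivePrimeSum prime out) := by unfold Spec_getConsecutivePrimeSum; infer_instance

-- ===== CLAIM (what is proved, stated in full; the proofs are below) =====
def Claim_equal_getConsecutivePrimeSum : Prop := ∀ (prime : Int), Dom_getConsecutivePrimeSum prime → Spec_getConsecutivePrimeSum prime (getConsecutivePrimeSum prime)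

-- ===== LEMMAS AND PROOFS =====

-- checkLoop counts the divisors of n in the list (with early exit at two)
theorem checkLoop_eq (n : Int) (l : List Int) (f : Int) :
    checkLoop n f l
      = if f + (l.countP (fun i => PySem.Int.mod n i == 0) : Int) = 1 then n else 0 := by
  induction l generalizing f with
  | nil => simp [checkLoop]
  | cons i rest ih =>
    by_cases hd : PySem.Int.mod n i == 0 <;>
      simp only [checkLoop, List.countP_cons, hd, ih, if_true, if_false, Bool.false_eq_true] <;>
      split_ifs <;> push_cast at * <;> omega

-- for k ≥ 2: checkPrime k = k exactly when k has no divisor in [2, k)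
theorem checkPrime_eq_self_iff (k : Int) (hk : 2 ≤ k) :
    (checkPrime k = k) ↔ (PySem.List.pyRange 2 k 1).countP (fun d => PySem.Int.mod k d == 0) = 0 := by
  have h1 : PySem.List.pyRange 2 (k + 1) 1 = PySem.List.pyRange 2 k 1 ++ [k] :=
    PySem.List.pyRange_one_succ_right hk
  have hkk : (PySem.Int.mod k k == 0) = true := by
    simp [PySem.Int.mod_eq_zero_iff_dvd]
  rw [checkPrime, h1, checkLoop_eq]
  simp only [List.countP_append, List.countP_cons, hkk, List.countP_nil]
  by_cases hc : (PySem.List.pyRange 2 k 1).countP (fun d => PySem.Int.mod k d == 0) = 0 <;>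
    simp [hc] <;> omega

-- length is preserved by a mark-fold
theorem length_foldl_set (l : List Int) (c : List Bool) :
    (l.foldl (fun c j => c.set j.toNat true) c).length = c.length := by
  induction l generalizing c with
  | nil => rfl
  | cons j l ih => simp [List.foldl_cons, ih]

-- value of a mark-fold at any index
theorem getD_foldl_set (l : List Int) (c : List Bool) (k : Nat)
    (hlt : ∀ j ∈ l, j.toNat < c.length) :
    (l.foldl (fun c j => c.set j.toNat true) c).getD k false
      = (c.getD k false || l.any (fun j => j.toNat == k)) := by
  induction l generalizing c with
  | nil => simp
  | cons j l ih =>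
    rw [List.foldl_cons, ih _ (fun j hj => by simpa using hlt j (List.mem_cons_of_mem _ hj))]
    have hj : j.toNat < c.length := hlt j List.mem_cons_self
    by_cases hk : j.toNat = k
    · subst hk
      simp [List.getD_eq_getElem?_getD, hj]
    · simp [List.getD_eq_getElem?_getD, List.getElem?_set_ne hk, hk,
        Bool.or_assoc, Bool.or_comm]

-- value of the sieve fold at any index
theorem sieve_fold_getD (n : Int) (l : List Int) (hl : ∀ i ∈ l, 2 ≤ i)
    (c : List Bool) (hc : (c.length : Int) = n) (k : Nat) :
    (l.foldl (fun c i => markMultiples i n c) c).getD k false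
      = (c.getD k false || l.any (fun i =>
          (PySem.List.pyRange 2 (PySem.Int.floordiv (n - 1) i + 1) 1).any
            (fun m => (i * m).toNat == k))) := by
  induction l generalizing c with
  | nil => simp
  | cons i l ih =>
    have hi : 2 ≤ i := hl i List.mem_cons_self
    have hbound : ∀ m ∈ PySem.List.pyRange 2 (PySem.Int.floordiv (n - 1) i + 1) 1,
        (i * m).toNat < c.length := by
      intro m hm
      rw [PySem.List.mem_pyRange_one] at hm
      have hm2 : m ≤ PySem.Int.floordiv (n - 1) i := by omega
      have hle : i * m ≤ n - 1 := by
        rw [mul_comm]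
        exact (PySem.Int.le_floordiv_iff_mul_le (by omega : (0:Int) < i)).mp hm2
      have h0 : 0 ≤ i * m := mul_nonneg (by omega) (by omega)
      omega
    have hfold : markMultiples i n c
        = ((PySem.List.pyRange 2 (PySem.Int.floordiv (n - 1) i + 1) 1).map (fun m => i * m)).foldl
            (fun c j => c.set j.toNat true) c := by
      rw [markMultiples, List.foldl_map]
    have hbound' : ∀ j ∈ (PySem.List.pyRange 2 (PySem.Int.floordiv (n - 1) i + 1) 1).map (fun m => i * m),
        j.toNat < c.length := by
      intro j hj
      obtain ⟨m, hm, rfl⟩ := List.mem_map.mp hj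
      exact hbound m hm
    have hlen : (markMultiples i n c).length = c.length := by
      rw [hfold]; exact length_foldl_set _ _
    rw [List.foldl_cons, ih (fun j hj => hl j (List.mem_cons_of_mem _ hj)) _ (by rw [hlen]; exact hc)]
    rw [hfold, getD_foldl_set _ _ _ hbound']
    simp [List.any_map, Function.comp_def, Bool.or_assoc]

-- value of the sieve at any index
theorem sieve_getD (n : Int) (hn : 2 ≤ n) (k : Nat) :
    (sieve n).getD k false
      = (PySem.List.pyRange 2 n 1).any (fun i =>
          (PySem.List.pyRange 2 (PySem.Int.floordiv (n - 1) i + 1) 1).any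
            (fun m => (i * m).toNat == k)) := by
  rw [sieve, sieve_fold_getD n _ (fun i hi => (PySem.List.mem_pyRange_one.mp hi).1)
    _ (by simp; omega) k]
  simp

-- for 2 ≤ k < n the sieve bit says: k is a product of two factors ≥ 2
theorem sieve_getD_iff (n k : Int) (hn : 2 ≤ n) (h2 : 2 ≤ k) (hkn : k < n) :
    (sieve n).getD k.toNat false = true ↔ ∃ i m : Int, 2 ≤ i ∧ 2 ≤ m ∧ k = i * m := by
  rw [sieve_getD n hn]
  simp only [List.any_eq_true, PySem.List.mem_pyRange_one, beq_iff_eq]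
  constructor
  · rintro ⟨i, ⟨hi2, hin⟩, m, ⟨hm2, hmfd⟩, hk⟩
    have hm2' : m ≤ PySem.Int.floordiv (n - 1) i := by omega
    have := (PySem.Int.le_floordiv_iff_mul_le (by omega : (0:Int) < i)).mp hm2'
    have h0 : 0 ≤ i * m := by positivity
    exact ⟨i, m, hi2, hm2, by omega⟩
  · rintro ⟨i, m, hi2, hm2, hk⟩
    have hcomm : i * m = m * i := mul_comm i m
    have him : i * 2 ≤ i * m := by
      apply mul_le_mul_of_nonneg_left hm2 (by omega)
    have hfd : m ≤ PySem.Int.floordiv (n - 1) i :=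
      (PySem.Int.le_floordiv_iff_mul_le (by omega : (0:Int) < i)).mpr (by omega)
    exact ⟨i, ⟨hi2, by omega⟩, m, ⟨hm2, by omega⟩, by omega⟩

-- divisor in [2,k) ↔ nontrivial factorization
theorem divisor_iff_factor (k : Int) (h2 : 2 ≤ k) :
    (∃ d, 2 ≤ d ∧ d < k ∧ d ∣ k) ↔ ∃ i m : Int, 2 ≤ i ∧ 2 ≤ m ∧ k = i * m := by
  constructor
  · rintro ⟨d, hd2, hdk, m, hm⟩
    refine ⟨d, m, hd2, ?_, hm⟩
    have hm0 : 0 < m := by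
      by_contra h
      have : d * m ≤ 0 := mul_nonpos_of_nonneg_of_nonpos (by omega) (by omega)
      omega
    by_contra hm2
    have hm1 : m = 1 := by omega
    rw [hm1, mul_one] at hm
    omega
  · rintro ⟨i, m, hi2, hm2, hk⟩
    have him : i * 2 ≤ i * m := mul_le_mul_of_nonneg_left hm2 (by omega)
    exact ⟨i, hi2, by omega, ⟨m, hk⟩⟩

-- the two prime lists coincide
theorem primes_eq (prime : Int) :
    getPrimes prime
      = (PySem.List.pyRange 2 prime 1).foldl
          (fun acc i => if !(PySem.List.pyGetD (sieve (if prime > 2 then prime else 2)) i false)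
                        then acc ++ [i] else acc) [] := by
  rw [getPrimes,
    PySem.List.foldl_append_if (fun i => checkPrime i == i) checkPrime,
    PySem.List.foldl_append_if (fun i => !(PySem.List.pyGetD (sieve (if prime > 2 then prime else 2)) i false)) (fun i => i)]
  simp only [List.nil_append, List.map_id']
  rw [List.map_congr_left (f := checkPrime) (g := fun i => i)
    (by intro i hi
        have := List.of_mem_filter hi
        simpa using this)]
  · rw [List.map_id']
    apply List.filter_congr
    intro i hi
    rw [PySem.List.mem_pyRange_one] at hi
    have hn : (if prime > 2 then prime else 2) = prime := by
      rw [if_pos (by omega)]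
    rw [hn]
    have h2i : 2 ≤ i := hi.1
    have hip : i < prime := hi.2
    have hiff : (checkPrime i = i) ↔ ¬ ((sieve prime).getD i.toNat false = true) := by
      rw [checkPrime_eq_self_iff i h2i, sieve_getD_iff prime i (by omega) h2i hip,
        ← divisor_iff_factor i h2i, List.countP_eq_zero]
      constructor
      · rintro h ⟨d, hd2, hdk, hdvd⟩
        have hnd := h d (PySem.List.mem_pyRange_one.mpr ⟨hd2, hdk⟩)
        simp only [beq_iff_eq] at hnd
        exact hnd ((PySem.Int.mod_eq_zero_iff_dvd _ _).mpr hdvd)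
      · intro h d hd
        rw [PySem.List.mem_pyRange_one] at hd
        simp only [beq_iff_eq, PySem.Int.mod_eq_zero_iff_dvd]
        intro hdvd
        exact h ⟨d, hd.1, hd.2, hdvd⟩
    rw [PySem.List.pyGetD_of_nonneg _ _ (by omega : (0:Int) ≤ i), Bool.eq_iff_iff]
    simp only [beq_iff_eq, Bool.not_eq_true']
    rw [hiff]
    simp

-- the two summation loops coincide, index by index
theorem sumLoops_aux (prime : Int) (L : List Int) :
    ∀ (d : Nat) (a s : Int), 0 ≤ a → d = ((L.length : Int) - 1 - a).toNat →
    sumLoopA prime L s (PySem.List.pyRange a ((L.length : Int) - 1) 1)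
      = sumLoopB prime s (L.dropLast.drop a.toNat) := by
  intro d
  induction d with
  | zero =>
    intro a s ha hd
    have hge : (L.length : Int) - 1 ≤ a := by omega
    rw [PySem.List.pyRange_one_eq_nil hge]
    have : L.dropLast.length ≤ a.toNat := by
      simp [List.length_dropLast]; omega
    rw [List.drop_of_length_le this]
    rfl
  | succ d ih =>
    intro a s ha hd
    have hlt : a < (L.length : Int) - 1 := by omega
    have hlen : a.toNat < L.dropLast.length := by
      simp [List.length_dropLast]; omega
    have hlenL : a.toNat < L.length := by omega
    rw [PySem.List.pyRange_one_cons hlt]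
    rw [List.drop_eq_getElem_cons hlen]
    simp only [sumLoopA, sumLoopB, List.getElem_dropLast]
    rw [PySem.List.pyGetD_of_nonneg _ _ ha, List.getD_eq_getElem _ _ hlenL]
    split_ifs with h1 h2
    · rfl
    · rfl
    · rw [ih (a + 1) _ (by omega) (by omega)]
      have hnat : (a + 1).toNat = a.toNat + 1 := by omega
      rw [hnat]

theorem sumLoops_eq (prime : Int) (L : List Int) (s a : Int) (ha : 0 ≤ a) :
    sumLoopA prime L s (PySem.List.pyRange a ((L.length : Int) - 1) 1)
      = sumLoopB prime s (L.dropLast.drop a.toNat) := by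
  exact sumLoops_aux prime L _ a s ha rfl

-- ===== VERDICT (by name: the statement is the Claim_ definition above) =====
theorem getConsecutivePrimeSum_spec : Claim_equal_getConsecutivePrimeSum := by
  intro prime _
  show getConsecutivePrimeSum prime = getConsecutivePrimeSum_alt prime
  unfold getConsecutivePrimeSum getConsecutivePrimeSum_alt
  simp only [PySem.List.slice_to_neg_one, ← primes_eq prime]
  simpa using sumLoops_eq prime (getPrimes prime) 0 0 le_rfl
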